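-- pv_equiv track=rewrite | github.com/AaronCodesPython/BookCipher-Encrypt-Decrypt | bookCipher.py | actual_encryption
-- ===== SOURCE A (Python) =====
-- from collections import defaultdict
--
-- symbols_to_ignore = {
--     '.', ',', '!', '?', ':', ';', '"', "'", '(', ')', '[', ']', '{', '}',
--     '-', '/', '\\', '&', '*', '#', '%', '$', '^', '_', '~', ' ', '\n'
-- }
--
-- def actual_encryption(key_message, UnencryptMsg):
--     chars_to_nums = defaultdict(list)
--     encryptedMsg = ""
--
--     for i,st in enumerate(key_message):
--         while len(st) > 0 and st[0] in symbols_to_ignore: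
--             st = st[1:]
--         if len(st) > 0:
--             chars_to_nums[st[0]].append(i+1)
--
--     for c in UnencryptMsg:
--         if  not c in symbols_to_ignore:
--             if len(chars_to_nums[c]) > 0:
--                 encryptedMsg += str(chars_to_nums[c][0])+" "
--                 chars_to_nums[c].pop(0)
--             else:
--                 encryptedMsg += '# '
--     return encryptedMsg
-- ===== SOURCE B (Python) =====
-- symbols_to_ignore = {
--     '.', ',', '!', '?', ':', ';', '"', "'", '(', ')', '[', ']', '{', '}',
--     '-', '/', '\\', '&', '*', '#', '%', '$', '^', '_', '~', ' ', '\n'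
-- }
--
-- def first_letter(word):
--     for ch in word:
--         if ch not in symbols_to_ignore:
--             return ch
--     return None
--
-- def actual_encryption(key_message, UnencryptMsg):
--     firsts = [first_letter(w) for w in key_message]
--     used = [False] * len(firsts)
--     tokens = []
--     for c in UnencryptMsg:
--         if c in symbols_to_ignore:
--             continue
--         for j, (f, u) in enumerate(zip(firsts, used)):
--             if not u and f == c:
--                 used[j] = True
--                 tokens.append(str(j + 1))
--                 break
--         else:
--             tokens.append('#')
--     return (' '.join(tokens) + ' ') if tokens else ''
-- ===== Notes on version B (the rewrite author's own statement) =====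
-- stated objective: alternative
-- what changed: A prebuilds a per-first-letter FIFO dict of key positions and pops from it; B keeps only the stripped first letter of each key word plus a used-slot boolean mask and, for each plaintext character, linearly rescans the first letters for the earliest unused match.
import Mathlib
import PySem

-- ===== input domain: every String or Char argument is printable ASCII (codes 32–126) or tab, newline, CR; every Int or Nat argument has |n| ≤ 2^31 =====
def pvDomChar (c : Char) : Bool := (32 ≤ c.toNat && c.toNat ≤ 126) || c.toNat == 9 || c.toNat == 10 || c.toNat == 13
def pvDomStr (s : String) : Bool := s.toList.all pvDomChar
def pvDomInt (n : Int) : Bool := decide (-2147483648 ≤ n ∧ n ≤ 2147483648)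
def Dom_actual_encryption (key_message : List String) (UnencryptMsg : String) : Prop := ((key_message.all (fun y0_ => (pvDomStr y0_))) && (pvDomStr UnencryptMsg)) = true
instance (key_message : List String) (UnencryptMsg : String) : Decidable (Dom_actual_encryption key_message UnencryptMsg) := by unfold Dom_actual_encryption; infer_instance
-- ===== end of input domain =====

-- B replaces A's prebuilt per-letter FIFO position table by a per-plaintext-char linear scan
-- over the key words' first letters with a used-slot mask (objective: alternative decomposition,
-- same observable result; no speed claim).

-- shared module constant: symbols_to_ignore
def ignoreChars : List Char :=
  ['.', ',', '!', '?', ':', ';', '"', '\'', '(', ')', '[', ']', '{', '}',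
   '-', '/', '\\', '&', '*', '#', '%', '$', '^', '_', '~', ' ', '\n']

def isIgn (c : Char) : Bool := ignoreChars.contains c

-- ===== PORT A =====
-- while len(st) > 0 and st[0] in symbols_to_ignore: st = st[1:]
def stripA : List Char → List Char
  | [] => []
  | c :: r => if isIgn c then stripA r else c :: r

-- for i, st in enumerate(key_message): … chars_to_nums[st[0]].append(i+1)
def buildA : List String → Nat → PySem.Dict Char (List Int) → PySem.Dict Char (List Int)
  | [], _, d => d
  | st :: rest, i, d =>
      match stripA st.toList with
      | [] => buildA rest (i + 1) d
      | c :: _ => buildA rest (i + 1) (d.insert c ((d.getD c []) ++ [(i : Int) + 1]))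

-- for c in UnencryptMsg: …
def loopA : List Char → PySem.Dict Char (List Int) → String → String
  | [], _, acc => acc
  | c :: rest, d, acc =>
      if isIgn c then loopA rest d acc
      else
        match d.getD c [] with
        | [] => loopA rest d (acc ++ "# ")
        | p :: ps => loopA rest (d.insert c ps) (acc ++ PySem.Int.toStr p ++ " ")

def actual_encryption (key_message : List String) (UnencryptMsg : String) : String :=
  loopA UnencryptMsg.toList (buildA key_message 0 PySem.Dict.empty) ""

-- ===== PORT B =====
-- first_letter(word): first non-ignored character, else None
def firstLetter : List Char → Option Char
  | [] => none
  | c :: r => if isIgn c then firstLetter r else some c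

-- for j, (f, u) in enumerate(zip(firsts, used)): …
def findSlot (c : Char) : List (Option Char) → List Bool → Nat → Option Nat
  | f :: fs, u :: us, j => if !u && f == some c then some j else findSlot c fs us (j + 1)
  | _, _, _ => none

-- for c in UnencryptMsg: … tokens.append(…)
def loopB (fs : List (Option Char)) : List Char → List Bool → List String → List String
  | [], _, toks => toks
  | c :: rest, used, toks =>
      if isIgn c then loopB fs rest used toks
      else
        match findSlot c fs used 0 with
        | some j => loopB fs rest (used.set j true) (toks ++ [PySem.Int.toStr ((j : Int) + 1)])
        | none => loopB fs rest used (toks ++ ["#"])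

def actual_encryption_alt (key_message : List String) (UnencryptMsg : String) : String :=
  let firsts := key_message.map (fun w => firstLetter w.toList)
  let toks := loopB firsts UnencryptMsg.toList (List.replicate firsts.length false) []
  if toks.isEmpty then "" else PySem.Str.join " " toks ++ " "

-- ===== PRECONDITION & SPEC =====
def Spec_actual_encryption (key_message : List String) (UnencryptMsg : String) (out : String) : Prop := out = actual_encryption_alt key_message UnencryptMsg
instance (key_message : List String) (UnencryptMsg : String) (out : String) : Decidable (Spec_actual_encryption key_message UnencryptMsg out) := by unfold Spec_actual_encryption; infer_instance

-- ===== CLAIM (what is proved, stated in full; the proofs are below) =====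
def Claim_equal_actual_encryption : Prop := ∀ (key_message : List String) (UnencryptMsg : String), Dom_actual_encryption key_message UnencryptMsg → Spec_actual_encryption key_message UnencryptMsg (actual_encryption key_message UnencryptMsg)

-- ===== LEMMAS AND PROOFS =====

-- the still-available 1-based positions whose first letter is c, in increasing order
def poss (c : Char) : List (Option Char) → List Bool → Nat → List Int
  | f :: fs, u :: us, j =>
      (if !u && f == some c then [(j : Int) + 1] else []) ++ poss c fs us (j + 1)
  | _, _, _ => []

def tokString : List String → String
  | [] => ""
  | t :: ts => t ++ " " ++ tokString ts

lemma firstLetter_eq_head (cs : List Char) : firstLetter cs = (stripA cs).head? := by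
  induction cs with
  | nil => rfl
  | cons c r ih => simp only [firstLetter, stripA]; split <;> simp [ih]

lemma buildA_getD (key : List String) : ∀ (i : Nat) (d : PySem.Dict Char (List Int)) (c : Char),
    (buildA key i d).getD c [] =
      d.getD c [] ++ poss c (key.map (fun w => firstLetter w.toList)) (List.replicate key.length false) i := by
  induction key with
  | nil => intro i d c; simp [buildA, poss]
  | cons st rest ih =>
    intro i d c
    have hfl := firstLetter_eq_head st.toList
    cases hs : stripA st.toList with
    | nil =>
      rw [hs] at hfl
      simp only [buildA, hs, List.map_cons, List.length_cons, List.replicate_succ, poss, hfl]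
      simp [ih]
    | cons a tl =>
      rw [hs] at hfl
      simp only [buildA, hs, List.map_cons, List.length_cons, List.replicate_succ, poss, hfl]
      rw [ih]
      rw [PySem.Dict.getD_insert]
      by_cases hc : c = a
      · subst hc; simp
      · have : ¬ ((some a == some c) = true) := by simp; exact fun h => hc h.symm
        simp [hc, this]

lemma poss_succ (fs : List (Option Char)) : ∀ (us : List Bool) (c : Char) (j : Nat),
    poss c fs us (j + 1) = (poss c fs us j).map (· + 1) := by
  induction fs with
  | nil => intro us c j; cases us <;> rfl
  | cons f fs ih =>
    intro us c j
    cases us with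
    | nil => rfl
    | cons u us =>
      simp only [poss, List.map_append, ih us c (j + 1)]
      split <;> first
        | (simp only [List.map_cons, List.map_nil]
           push_cast; ring_nf; try simp)
        | simp

lemma findSlot_succ (fs : List (Option Char)) : ∀ (us : List Bool) (c : Char) (j : Nat),
    findSlot c fs us (j + 1) = (findSlot c fs us j).map (· + 1) := by
  induction fs with
  | nil => intro us c j; cases us <;> rfl
  | cons f fs ih =>
    intro us c j
    cases us with
    | nil => rfl
    | cons u us =>
      simp only [findSlot]
      split
      · rfl
      · exact ih us c (j + 1)

lemma slot_none (fs : List (Option Char)) : ∀ (us : List Bool) (c : Char),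
    poss c fs us 0 = [] → findSlot c fs us 0 = none := by
  induction fs with
  | nil => intro us c _; cases us <;> rfl
  | cons f fs ih =>
    intro us c h
    cases us with
    | nil => rfl
    | cons u us =>
      simp only [poss] at h
      rcases List.append_eq_nil_iff.mp h with ⟨h1, h2⟩
      have hb : ¬ ((!u && f == some c) = true) := by
        intro hb; simp [hb] at h1
      rw [poss_succ] at h2
      have h0 : poss c fs us 0 = [] := by
        cases hp : poss c fs us 0 <;> simp [hp] at h2 ⊢
      simp only [findSlot, if_neg hb, findSlot_succ, ih us c h0, Option.map_none]

lemma slot_cons (fs : List (Option Char)) : ∀ (us : List Bool) (c : Char) (p : Int) (ps : List Int),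
    poss c fs us 0 = p :: ps →
    ∃ j : Nat, findSlot c fs us 0 = some j ∧ p = (j : Int) + 1 ∧
      poss c fs (us.set j true) 0 = ps ∧
      ∀ c', c' ≠ c → poss c' fs (us.set j true) 0 = poss c' fs us 0 := by
  induction fs with
  | nil => intro us c p ps h; cases us <;> simp [poss] at h
  | cons f fs ih =>
    intro us c p ps h
    cases us with
    | nil => simp [poss] at h
    | cons u us =>
      by_cases hb : (!u && f == some c) = true
      · refine ⟨0, ?_, ?_, ?_, ?_⟩
        · simp [findSlot, hb]
        · simp only [poss, if_pos hb] at h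
          exact (List.cons.injEq _ _ _ _ ▸ h).1.symm
        · simp only [poss, if_pos hb] at h
          have hps := (List.cons.injEq _ _ _ _ ▸ h).2
          obtain ⟨hu, hf⟩ : u = false ∧ f = some c := by simpa using hb
          subst hu hf
          simp only [List.set_cons_zero, poss]
          simpa using hps
        · intro c' hc'
          obtain ⟨hu, hf⟩ : u = false ∧ f = some c := by simpa using hb
          subst hf hu
          simp only [List.set_cons_zero, poss]
          have : ¬ ((some c == some c') = true) := by simp; exact fun h => hc' h.symm
          simp [this]
      · simp only [poss, if_neg hb, List.nil_append] at h
        rw [poss_succ] at h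
        rcases List.map_eq_cons_iff.mp h with ⟨q, qs, hq, hpq, hqs⟩
        rcases ih us c q qs hq with ⟨j', hfind, hpj, hset, hpres⟩
        refine ⟨j' + 1, ?_, ?_, ?_, ?_⟩
        · simp only [findSlot, if_neg hb, findSlot_succ, hfind, Option.map_some]
        · rw [← hpq, hpj]; push_cast; ring
        · simp only [List.set_cons_succ, poss, if_neg hb, List.nil_append, poss_succ, hset, hqs]
        · intro c' hc'
          simp only [List.set_cons_succ, poss, poss_succ, hpres c' hc']

lemma loopB_append (fs : List (Option Char)) : ∀ (cs : List Char) (us : List Bool) (toks : List String),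
    loopB fs cs us toks = toks ++ loopB fs cs us [] := by
  intro cs
  induction cs with
  | nil => intro us toks; simp [loopB]
  | cons c rest ih =>
    intro us toks
    by_cases hi : isIgn c = true
    · simp only [loopB, if_pos hi]; exact ih us toks
    · simp only [loopB, if_neg hi]
      cases hf : findSlot c fs us 0 with
      | some j =>
        dsimp only
        simp only [List.nil_append]
        rw [ih (us.set j true) (toks ++ [PySem.Int.toStr ((j : Int) + 1)]),
            ih (us.set j true) ([PySem.Int.toStr ((j : Int) + 1)])]
        simp
      | none =>
        dsimp only
        simp only [List.nil_append]
        rw [ih us (toks ++ ["#"]), ih us ["#"]]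
        simp

lemma hash_space : ("#" ++ " " : String) = "# " := by decide

lemma loop_main (fs : List (Option Char)) : ∀ (cs : List Char) (d : PySem.Dict Char (List Int)) (us : List Bool),
    (∀ c, d.getD c [] = poss c fs us 0) → ∀ acc : String,
    loopA cs d acc = acc ++ tokString (loopB fs cs us []) := by
  intro cs
  induction cs with
  | nil => intro d us _ acc; simp [loopA, loopB, tokString]
  | cons c rest ih =>
    intro d us hInv acc
    by_cases hi : isIgn c = true
    · simp only [loopA, loopB, if_pos hi]
      exact ih d us hInv acc
    · simp only [loopA, loopB, if_neg hi]
      cases hgd : d.getD c [] with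
      | nil =>
        have hposs : poss c fs us 0 = [] := by rw [← hInv c]; exact hgd
        rw [slot_none fs us c hposs]
        dsimp only
        simp only [List.nil_append]
        rw [ih d us hInv (acc ++ "# "), loopB_append fs rest us ["#"]]
        simp only [List.singleton_append, tokString]
        rw [← hash_space]
        simp [String.append_assoc]
      | cons p ps =>
        have hposs : poss c fs us 0 = p :: ps := by rw [← hInv c]; exact hgd
        rcases slot_cons fs us c p ps hposs with ⟨j, hfind, hpj, hset, hpres⟩
        rw [hfind]
        dsimp only
        have hInv' : ∀ c'', (d.insert c ps).getD c'' [] = poss c'' fs (us.set j true) 0 := by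
          intro c''
          rw [PySem.Dict.getD_insert]
          by_cases hcc : c'' = c
          · subst hcc; simp [hset]
          · rw [if_neg hcc, hpres c'' hcc, hInv c'']
        simp only [List.nil_append]
        rw [ih (d.insert c ps) (us.set j true) hInv' (acc ++ PySem.Int.toStr p ++ " "),
            loopB_append fs rest (us.set j true) [PySem.Int.toStr ((j : Int) + 1)], ← hpj]
        simp only [List.singleton_append, tokString]
        simp [String.append_assoc]

lemma join_cons_cons (t t' : String) (ts : List String) :
    PySem.Str.join " " (t :: t' :: ts) = t ++ " " ++ PySem.Str.join " " (t' :: ts) := by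
  apply String.toList_injective
  simp [PySem.Str.join, PySem.Chars.join_cons_cons]

lemma join_singleton (t : String) : PySem.Str.join " " [t] = t := by
  apply String.toList_injective
  simp [PySem.Str.join, PySem.Chars.join_singleton]

lemma join_trail : ∀ ts : List String,
    (if ts.isEmpty then "" else PySem.Str.join " " ts ++ " ") = tokString ts := by
  intro ts
  induction ts with
  | nil => rfl
  | cons t ts ih =>
    cases ts with
    | nil => simp [tokString, join_singleton]
    | cons t' ts' =>
      simp only [List.isEmpty_cons, if_neg (by simp : ¬ (false = true))] at ih ⊢
      rw [join_cons_cons, tokString, String.append_assoc, ← ih]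

-- ===== VERDICT (by name: the statement is the Claim_ definition above) =====
theorem actual_encryption_spec : Claim_equal_actual_encryption := by
  intro key msg _
  unfold Spec_actual_encryption actual_encryption actual_encryption_alt
  have hlen : (key.map (fun w => firstLetter w.toList)).length = key.length := by
    simp
  have hInv : ∀ c, (buildA key 0 PySem.Dict.empty).getD c [] =
      poss c (key.map (fun w => firstLetter w.toList))
        (List.replicate (key.map (fun w => firstLetter w.toList)).length false) 0 := by
    intro c
    rw [buildA_getD key 0 PySem.Dict.empty c, hlen]
    simp
  rw [loop_main _ msg.toList _ _ hInv ""]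
  rw [join_trail]
  simp
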